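-- pv_equiv track=rewrite | github.com/StickyPiston-Hosting/Easy-Map-Updater | lib/utils.py | is_partial_uuid
-- ===== SOURCE A (Python) =====
-- def is_partial_uuid(string: str) -> bool:
--     if len(string) != 16 or string.count("-") != 2:
--         return False
--
--     split_string = string.split("-")
--     if (
--         len(split_string[0]) != 8 or
--         len(split_string[1]) != 4 or
--         len(split_string[2]) != 2
--     ):
--         return False
--
--     legal_chars = ["0","1","2","3","4","5","6","7","8","9","a","b","c","d","e","f","-"]
--     for char in string:
--         if char not in legal_chars:
--             return False
--
--     return True
-- ===== SOURCE B (Python) =====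
-- def is_partial_uuid(string: str) -> bool:
--     if len(string) != 16 or string[8] != "-" or string[13] != "-":
--         return False
--     hex_digits = set("0123456789abcdef")
--     return all(char in hex_digits for char in string[:8] + string[9:13] + string[14:])
-- ===== Notes on version B (the rewrite author's own statement) =====
-- stated objective: simpler
-- what changed: replaces A's length/dash-count/split/char-loop pipeline with a direct positional check: dash at indices 8 and 13 and hex digits on the three slices around them
import Mathlib
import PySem

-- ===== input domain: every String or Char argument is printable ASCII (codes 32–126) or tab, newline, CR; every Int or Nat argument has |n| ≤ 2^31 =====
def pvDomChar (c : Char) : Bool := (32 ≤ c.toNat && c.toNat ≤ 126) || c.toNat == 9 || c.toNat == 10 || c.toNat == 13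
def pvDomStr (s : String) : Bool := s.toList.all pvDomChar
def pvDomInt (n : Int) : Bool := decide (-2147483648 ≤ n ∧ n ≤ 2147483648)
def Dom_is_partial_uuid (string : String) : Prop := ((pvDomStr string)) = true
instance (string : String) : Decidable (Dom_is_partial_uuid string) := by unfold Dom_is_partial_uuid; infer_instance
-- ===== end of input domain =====

-- B replaces A's count/split/char-loop pipeline with a direct positional check (dashes at
-- indices 8 and 13, hex digits on the three slices); objective: simpler, not claimed faster.

-- ===== PORT A =====
-- legal_chars is a Python list of 1-character strings compared against the characters of
-- `string`; it is ported as the same list of characters.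
def legal_chars_is_partial_uuid : List Char :=
  ['0','1','2','3','4','5','6','7','8','9','a','b','c','d','e','f','-']

def is_partial_uuid (string : String) : Bool :=
  if PySem.Str.len string ≠ 16 ∨ PySem.Str.count string "-" ≠ 2 then false
  else
    let split_string := (PySem.Str.split? string "-").getD []
    if PySem.Str.len (PySem.List.pyGetD split_string 0 "") ≠ 8 ∨
       PySem.Str.len (PySem.List.pyGetD split_string 1 "") ≠ 4 ∨
       PySem.Str.len (PySem.List.pyGetD split_string 2 "") ≠ 2 then false
    else
      string.toList.all (fun char => legal_chars_is_partial_uuid.contains char)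

-- ===== PORT B =====
def pvHex : PySem.Set Char := PySem.Set.ofList "0123456789abcdef".toList

def is_partial_uuid_alt (string : String) : Bool :=
  if PySem.Str.len string ≠ 16 then false
  else if ¬ (PySem.Str.pyGet? string 8 = some '-') then false
  else if ¬ (PySem.Str.pyGet? string 13 = some '-') then false
  else
    ((PySem.List.slice string.toList none (some 8) ++
      PySem.List.slice string.toList (some 9) (some 13)) ++
     PySem.List.slice string.toList (some 14) none).all
      (fun char => PySem.Set.contains pvHex char)

-- ===== PRECONDITION & SPEC =====
def Spec_is_partial_uuid (string : String) (out : Bool) : Prop := out = is_partial_uuid_alt string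
instance (string : String) (out : Bool) : Decidable (Spec_is_partial_uuid string out) := by unfold Spec_is_partial_uuid; infer_instance

-- ===== CLAIM (what is proved, stated in full; the proofs are below) =====
def Claim_equal_is_partial_uuid : Prop := ∀ (string : String), Dom_is_partial_uuid string → Spec_is_partial_uuid string (is_partial_uuid string)

-- ===== LEMMAS AND PROOFS =====

-- proof-side spec: the decomposition both programs recognise
def pvGood (l : List Char) : Prop :=
  ∃ a b c : List Char, l = a ++ '-' :: (b ++ '-' :: c) ∧
    a.length = 8 ∧ b.length = 4 ∧ c.length = 2 ∧
    ∀ x ∈ (a ++ b) ++ c, PySem.Set.contains pvHex x = true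

-- reference single-character split used to characterise PySem.Chars.splitOn on sep "-"
def mySplit : List Char → List Char → List (List Char)
  | pre, [] => [pre]
  | pre, c :: rest => if c = '-' then pre :: mySplit [] rest else mySplit (pre ++ [c]) rest

theorem count_go_eq (l : List Char) : ∀ (fuel acc : Nat), l.length ≤ fuel →
    PySem.Chars.count.go ['-'] fuel l acc = acc + l.count '-' := by
  induction l with
  | nil => intro fuel acc _; cases fuel <;> simp [PySem.Chars.count.go]
  | cons c rest ih =>
    intro fuel acc h
    cases fuel with
    | zero => simp at h
    | succ f =>
      simp only [PySem.Chars.count.go, List.isPrefixOf, List.drop]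
      by_cases hc : c = '-'
      · subst hc
        simp only [BEq.rfl, Bool.and_eq_true]
        rw [if_pos (by simp [List.isPrefixOf])]
        rw [show List.drop ['-'].length ('-' :: rest) = rest from rfl]
        rw [ih f (acc+1) (by simpa using h)]
        simp [List.count_cons]
        omega
      · rw [if_neg (by simp [List.isPrefixOf]; exact fun hh => hc hh.symm)]
        rw [ih f acc (by simpa using h)]
        simp [List.count_cons, hc]

theorem count_dash_eq (s : String) : PySem.Str.count s "-" = s.toList.count '-' := by
  show PySem.Chars.count s.toList ['-'] = _
  unfold PySem.Chars.count
  rw [if_neg (by simp)]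
  rw [count_go_eq _ _ 0 le_rfl]
  simp

theorem splitOn_go_eq (l : List Char) : ∀ (fuel : Nat) (cur : List Char) (acc : List (List Char)),
    l.length ≤ fuel →
    PySem.Chars.splitOn.go ['-'] fuel l cur acc = acc.reverse ++ mySplit cur.reverse l := by
  induction l with
  | nil => intro fuel cur acc _; cases fuel <;> simp [PySem.Chars.splitOn.go, mySplit]
  | cons c rest ih =>
    intro fuel cur acc h
    cases fuel with
    | zero => simp at h
    | succ f =>
      simp only [PySem.Chars.splitOn.go]
      by_cases hc : c = '-'
      · subst hc
        rw [if_pos (by simp [List.isPrefixOf])]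
        rw [show List.drop ['-'].length ('-' :: rest) = rest from rfl]
        rw [ih f [] (cur.reverse :: acc) (by simpa using h)]
        simp [mySplit]
      · rw [if_neg (by simp [List.isPrefixOf]; exact fun hh => hc hh.symm)]
        rw [ih f (c :: cur) acc (by simpa using h)]
        simp [mySplit, hc]

theorem splitOn_eq (l : List Char) : PySem.Chars.splitOn l ['-'] = mySplit [] l := by
  unfold PySem.Chars.splitOn
  rw [splitOn_go_eq l (l.length + 1) [] [] (by omega)]
  simp

theorem mySplit_no_dash (l : List Char) (h : '-' ∉ l) : ∀ pre, mySplit pre l = [pre ++ l] := by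
  induction l with
  | nil => intro pre; simp [mySplit]
  | cons c rest ih =>
    intro pre
    have hc : c ≠ '-' := fun hh => h (hh ▸ List.mem_cons_self)
    simp only [mySplit, if_neg hc]
    rw [ih (fun hh => h (List.mem_cons_of_mem _ hh))]
    simp

theorem mySplit_dash (a : List Char) (ha : '-' ∉ a) (b : List Char) :
    ∀ pre, mySplit pre (a ++ '-' :: b) = (pre ++ a) :: mySplit [] b := by
  induction a with
  | nil => intro pre; simp [mySplit]
  | cons c rest ih =>
    intro pre
    have hc : c ≠ '-' := fun hh => ha (hh ▸ List.mem_cons_self)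
    simp only [List.cons_append, mySplit, if_neg hc]
    rw [ih (fun hh => ha (List.mem_cons_of_mem _ hh))]
    simp

theorem first_dash (l : List Char) (h : '-' ∈ l) :
    ∃ a rest, l = a ++ '-' :: rest ∧ '-' ∉ a := by
  induction l with
  | nil => simp at h
  | cons c t ih =>
    by_cases hc : c = '-'
    · exact ⟨[], t, by simp [hc], by simp⟩
    · obtain ⟨a, rest, he, ha⟩ := ih (by rcases List.mem_cons.1 h with h1 | h2; exact absurd h1.symm hc; exact h2)
      refine ⟨c :: a, rest, by simp [he], ?_⟩
      simp only [List.mem_cons, not_or]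
      exact ⟨fun hh => hc hh.symm, ha⟩

theorem decomp_two (l : List Char) (h : l.count '-' = 2) :
    ∃ a b c, l = a ++ '-' :: (b ++ '-' :: c) ∧ '-' ∉ a ∧ '-' ∉ b ∧ '-' ∉ c := by
  obtain ⟨a, r, he, ha⟩ := first_dash l (List.count_pos_iff.1 (by omega))
  have hr : r.count '-' = 1 := by
    have := h; rw [he] at this
    simp [List.count_append, List.count_eq_zero_of_not_mem ha] at this
    omega
  obtain ⟨b, c, he2, hb⟩ := first_dash r (List.count_pos_iff.1 (by omega))
  have hc : '-' ∉ c := by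
    rw [← List.count_eq_zero]
    have := hr; rw [he2] at this
    simp [List.count_append, List.count_eq_zero_of_not_mem hb] at this
    omega
  exact ⟨a, b, c, by rw [he, he2], ha, hb, hc⟩

theorem hex_contains_iff (c : Char) :
    PySem.Set.contains pvHex c = true ↔ c ∈ "0123456789abcdef".toList := by
  rw [show pvHex = "0123456789abcdef".toList from by decide]
  simp [PySem.Set.contains]

theorem legal_iff (c : Char) :
    legal_chars_is_partial_uuid.contains c = true ↔
      (PySem.Set.contains pvHex c = true ∨ c = '-') := by
  rw [hex_contains_iff]
  simp [legal_chars_is_partial_uuid]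
  constructor
  · rintro (h|h|h|h|h|h|h|h|h|h|h|h|h|h|h|h|h) <;> subst h <;> simp
  · rintro (h|h)
    · rcases h with (h|h|h|h|h|h|h|h|h|h|h|h|h|h|h|h) <;> subst h <;> simp
    · subst h; simp

theorem mySplit_three (a b c : List Char) (ha : '-' ∉ a) (hb : '-' ∉ b) (hc : '-' ∉ c) :
    mySplit [] (a ++ '-' :: (b ++ '-' :: c)) = [a, b, c] := by
  rw [mySplit_dash a ha _ [], mySplit_dash b hb _ [], mySplit_no_dash c hc []]
  simp

theorem split_string_eq (s : String) :
    (PySem.Str.split? s "-").getD [] = (mySplit [] s.toList).map String.ofList := by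
  show (Option.map _ (PySem.Chars.split? s.toList ['-'])).getD [] = _
  rw [show PySem.Chars.split? s.toList ['-'] = some (PySem.Chars.splitOn s.toList ['-']) from by
    unfold PySem.Chars.split?; simp]
  rw [splitOn_eq]
  rfl

theorem no_dash_of_hex (xs : List Char) (h : ∀ x ∈ xs, PySem.Set.contains pvHex x = true) :
    '-' ∉ xs := by
  intro hm
  have := h _ hm
  rw [hex_contains_iff] at this
  simp at this

theorem A_iff (s : String) : is_partial_uuid s = true ↔ pvGood s.toList := by
  unfold is_partial_uuid
  constructor
  · intro h
    split_ifs at h with h1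
    dsimp only [] at h
    split_ifs at h with h2
    push_neg at h1
    obtain ⟨hlen, hcnt⟩ := h1
    rw [count_dash_eq] at hcnt
    obtain ⟨a, b, c, he, ha, hb, hc⟩ := decomp_two s.toList hcnt
    push_neg at h2
    rw [split_string_eq, he, mySplit_three a b c ha hb hc] at h2
    simp only [List.map_cons, List.map_nil] at h2
    have hga : PySem.List.pyGetD [String.ofList a, String.ofList b, String.ofList c] 0 "" = String.ofList a := by
      simp [PySem.List.pyGetD, PySem.List.pyGet?, PySem.List.pyIdx?]
    have hgb : PySem.List.pyGetD [String.ofList a, String.ofList b, String.ofList c] 1 "" = String.ofList b := by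
      simp [PySem.List.pyGetD, PySem.List.pyGet?, PySem.List.pyIdx?]
    have hgc : PySem.List.pyGetD [String.ofList a, String.ofList b, String.ofList c] 2 "" = String.ofList c := by
      simp [PySem.List.pyGetD, PySem.List.pyGet?, PySem.List.pyIdx?]
    rw [hga, hgb, hgc] at h2
    simp only [PySem.Str.len_eq, String.toList_ofList] at h2
    obtain ⟨hla, hlb, hlc⟩ := h2
    refine ⟨a, b, c, he, by exact_mod_cast hla, by exact_mod_cast hlb, by exact_mod_cast hlc, ?_⟩
    intro x hx
    have hxl : x ∈ s.toList := by
      rw [he]; simp at hx ⊢; tauto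
    have hleg := (List.all_eq_true.1 h) x hxl
    rw [legal_iff] at hleg
    rcases hleg with hh | hh
    · exact hh
    · exfalso; subst hh
      simp at hx
      rcases hx with hx|hx|hx
      exacts [ha hx, hb hx, hc hx]
  · rintro ⟨a, b, c, he, hla, hlb, hlc, hhex⟩
    have ha : '-' ∉ a := no_dash_of_hex a (fun x hx => hhex x (by simp [hx]))
    have hb : '-' ∉ b := no_dash_of_hex b (fun x hx => hhex x (by simp [hx]))
    have hc : '-' ∉ c := no_dash_of_hex c (fun x hx => hhex x (by simp [hx]))
    have hlen : s.toList.length = 16 := by rw [he]; simp [hla, hlb, hlc]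
    have hcnt : s.toList.count '-' = 2 := by
      rw [he]
      simp [List.count_append, List.count_cons,
        List.count_eq_zero_of_not_mem ha, List.count_eq_zero_of_not_mem hb,
        List.count_eq_zero_of_not_mem hc]
    rw [if_neg (by push_neg; exact ⟨by simp [hlen], by rw [count_dash_eq, hcnt]⟩)]
    rw [split_string_eq, he, mySplit_three a b c ha hb hc]
    simp only [List.map_cons, List.map_nil]
    rw [if_neg (by
      push_neg
      refine ⟨?_, ?_, ?_⟩ <;>
        simp [PySem.List.pyGetD, PySem.List.pyGet?, PySem.List.pyIdx?, hla, hlb, hlc])]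
    rw [List.all_eq_true]
    intro x hx
    rw [legal_iff]
    simp at hx
    rcases hx with (hx | hx | hx | hx | hx)
    · exact Or.inl (hhex x (by simp [hx]))
    · exact Or.inr hx
    · exact Or.inl (hhex x (by simp [hx]))
    · exact Or.inr hx
    · exact Or.inl (hhex x (by simp [hx]))

theorem B_iff (s : String) : is_partial_uuid_alt s = true ↔ pvGood s.toList := by
  unfold is_partial_uuid_alt
  rw [show PySem.List.slice s.toList none (some 8) = s.toList.take 8 from by
        simpa using PySem.List.slice_to s.toList (b := 8) (by norm_num),
      show PySem.List.slice s.toList (some 9) (some 13) = (s.toList.drop 9).take 4 from by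
        simpa using PySem.List.slice_natCast s.toList 9 13,
      show PySem.List.slice s.toList (some 14) none = s.toList.drop 14 from by
        simpa using PySem.List.slice_from s.toList (a := 14) (by norm_num),
      show PySem.Str.pyGet? s 8 = s.toList[8]? from by
        simpa [PySem.Str.pyGet?] using PySem.Str.pyGet?_natCast s 8,
      show PySem.Str.pyGet? s 13 = s.toList[13]? from by
        simpa [PySem.Str.pyGet?] using PySem.Str.pyGet?_natCast s 13,
      PySem.Str.len_eq]
  constructor
  · intro h
    split_ifs at h with h1 h2 h3
    have hlen : s.toList.length = 16 := by omega
    have h8 : ∃ (hh : 8 < s.toList.length), s.toList[8] = '-' := by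
      rcases List.getElem?_eq_some_iff.1 h2 with ⟨hh, he⟩
      exact ⟨hh, he⟩
    have h13 : ∃ (hh : 13 < s.toList.length), s.toList[13] = '-' := by
      rcases List.getElem?_eq_some_iff.1 h3 with ⟨hh, he⟩
      exact ⟨hh, he⟩
    obtain ⟨hb8, he8⟩ := h8
    obtain ⟨hb13, he13⟩ := h13
    have he : s.toList = s.toList.take 8 ++ '-' :: ((s.toList.drop 9).take 4 ++ '-' :: s.toList.drop 14) := by
      conv_lhs => rw [← List.take_append_drop 8 s.toList]
      congr 1
      rw [← List.getElem_cons_drop hb8, he8, show (8 + 1 : Nat) = 9 from rfl]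
      congr 1
      conv_lhs => rw [← List.take_append_drop 4 (s.toList.drop 9)]
      congr 1
      rw [List.drop_drop, show (9 + 4 : Nat) = 13 from rfl,
          ← List.getElem_cons_drop hb13, he13, show (13 + 1 : Nat) = 14 from rfl]
    refine ⟨s.toList.take 8, (s.toList.drop 9).take 4, s.toList.drop 14, he, ?_, ?_, ?_, ?_⟩
    · simp [hlen]
    · simp [hlen]
    · simp [hlen]
    · intro x hx
      exact (List.all_eq_true.1 h) x hx
  · rintro ⟨a, b, c, he, hla, hlb, hlc, hhex⟩
    have hlen : s.toList.length = 16 := by rw [he]; simp [hla, hlb, hlc]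
    have ht8 : s.toList.take 8 = a := by rw [he]; exact List.take_left' hla
    have hd8 : s.toList.drop 8 = '-' :: (b ++ '-' :: c) := by rw [he]; exact List.drop_left' hla
    have hd9 : s.toList.drop 9 = b ++ '-' :: c := by
      have h99 : s.toList.drop 9 = (s.toList.drop 8).drop 1 := by rw [List.drop_drop]
      rw [h99, hd8]; rfl
    have htb : (s.toList.drop 9).take 4 = b := by rw [hd9]; exact List.take_left' hlb
    have hd13 : s.toList.drop 13 = '-' :: c := by
      have h1313 : s.toList.drop 13 = (s.toList.drop 9).drop 4 := by rw [List.drop_drop]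
      rw [h1313, hd9]; exact List.drop_left' hlb
    have hd14 : s.toList.drop 14 = c := by
      have h1414 : s.toList.drop 14 = (s.toList.drop 13).drop 1 := by rw [List.drop_drop]
      rw [h1414, hd13]; rfl
    have h8 : s.toList[8]? = some '-' := by
      rw [show s.toList[8]? = (s.toList.drop 8)[0]? from by rw [List.getElem?_drop], hd8]; rfl
    have h13 : s.toList[13]? = some '-' := by
      rw [show s.toList[13]? = (s.toList.drop 13)[0]? from by rw [List.getElem?_drop], hd13]; rfl
    rw [if_neg (by omega), if_neg (not_not_intro h8), if_neg (not_not_intro h13)]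
    rw [ht8, htb, hd14, List.all_eq_true]
    exact hhex

-- ===== VERDICT (by name: the statement is the Claim_ definition above) =====
theorem is_partial_uuid_spec : Claim_equal_is_partial_uuid := by
  intro s _
  unfold Spec_is_partial_uuid
  have h := (A_iff s).trans (B_iff s).symm
  cases hA : is_partial_uuid s <;> cases hB : is_partial_uuid_alt s <;> simp_all
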